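-- pv_equiv track=rewrite | github.com/kleberlucena/datahub | apps/watermark/helpers.py | calculate_positions_mark_custom
-- ===== SOURCE A (Python) =====
-- large_height = 50
--
-- def calculate_positions_mark_custom(img_width, img_height):
--     """
--     It receives the dimensions of the images to be worked on.
--     Returns a list of tuples with positions (x, y) where watermarks should be saved.
--     """
--     horizontal_quantity = int((img_width - 25) / 115)
--     horizontal_rest = int((img_width - 25) % 115)
--     horizontal_adjust = int(horizontal_rest / (horizontal_quantity + 1))
--     vertical_quantity = int((img_height - 15) / 49)
--     vertical_rest = int((img_height - 15) % 49)
--     vertical_adjust = int(vertical_rest / (vertical_quantity + 1))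
--
--     watermark_positions = []
--
--     for indice_horizontal in range(horizontal_quantity):
--         x = 25 + horizontal_adjust + (indice_horizontal * 115) + (indice_horizontal * horizontal_adjust)
--         for indice_vertical in range(vertical_quantity):
--             y = 15 + vertical_adjust + (indice_vertical * large_height) + (indice_vertical * vertical_adjust)
--             watermark_positions.append((x, y))
--
--     return watermark_positions
-- ===== SOURCE B (Python) =====
-- large_height = 50
--
-- def calculate_positions_mark_custom(img_width, img_height):
--     """
--     It receives the dimensions of the images to be worked on.
--     Returns a list of tuples with positions (x, y) where watermarks should be saved.
--     """
--     horizontal_quantity = int((img_width - 25) / 115)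
--     horizontal_rest = int((img_width - 25) % 115)
--     horizontal_adjust = int(horizontal_rest / (horizontal_quantity + 1))
--     vertical_quantity = int((img_height - 15) / 49)
--     vertical_rest = int((img_height - 15) % 49)
--     vertical_adjust = int(vertical_rest / (vertical_quantity + 1))
--
--     if horizontal_quantity <= 0 or vertical_quantity <= 0:
--         return []
--
--     # one flat pass: decode the cell (row, column) of each linear index k
--     x_step = 115 + horizontal_adjust
--     y_step = large_height + vertical_adjust
--     total = horizontal_quantity * vertical_quantity
--     return [(25 + horizontal_adjust + (k // vertical_quantity) * x_step,
--              15 + vertical_adjust + (k % vertical_quantity) * y_step)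
--             for k in range(total)]
-- ===== Notes on version B (the rewrite author's own statement) =====
-- stated objective: alternative
-- what changed: B replaces A's nested row/column loops by a single flat pass over linear indices 0..hq*vq-1, decoding each index k into its grid cell with divmod (k // vq, k % vq) and computing both coordinates from that cell with precomputed strides.
-- outside the precondition, e.g. on calculate_positions_mark_custom(-100, 300): A raises ZeroDivisionError, B raises ZeroDivisionError; on calculate_positions_mark_custom(100, -50): A raises ZeroDivisionError, B raises ZeroDivisionError
import Mathlib
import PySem

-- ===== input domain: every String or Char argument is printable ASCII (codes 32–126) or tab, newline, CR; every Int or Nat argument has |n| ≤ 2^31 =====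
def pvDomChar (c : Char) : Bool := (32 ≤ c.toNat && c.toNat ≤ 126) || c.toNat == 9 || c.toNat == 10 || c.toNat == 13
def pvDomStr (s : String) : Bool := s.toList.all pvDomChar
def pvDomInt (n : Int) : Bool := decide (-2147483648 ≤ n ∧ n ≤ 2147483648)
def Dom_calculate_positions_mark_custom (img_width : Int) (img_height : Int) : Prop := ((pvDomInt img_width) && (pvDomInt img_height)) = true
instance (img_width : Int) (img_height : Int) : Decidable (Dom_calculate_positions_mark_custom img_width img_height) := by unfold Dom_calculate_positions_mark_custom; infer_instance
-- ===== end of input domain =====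

-- B replaces A's nested row/column loops by one flat pass over linear indices, decoding each
-- index into its grid cell with divmod; same cost, a different decomposition of the grid.

-- ===== PORT A =====
-- int(a/b) on these Int inputs (|·| ≤ 2^31) equals truncating division Int.tdiv (float division is
-- exact enough here to truncate identically); Python's '%' is PySem.Int.mod.
def calculate_positions_mark_custom (img_width : Int) (img_height : Int) : List (Int × Int) :=
  let horizontal_quantity := Int.tdiv (img_width - 25) 115
  let horizontal_rest := PySem.Int.mod (img_width - 25) 115
  let horizontal_adjust := Int.tdiv horizontal_rest (horizontal_quantity + 1)
  let vertical_quantity := Int.tdiv (img_height - 15) 49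
  let vertical_rest := PySem.Int.mod (img_height - 15) 49
  let vertical_adjust := Int.tdiv vertical_rest (vertical_quantity + 1)
  (PySem.List.pyRange 0 horizontal_quantity 1).foldl (fun acc indice_horizontal =>
    let x := 25 + horizontal_adjust + (indice_horizontal * 115) + (indice_horizontal * horizontal_adjust)
    (PySem.List.pyRange 0 vertical_quantity 1).foldl (fun acc2 indice_vertical =>
      let y := 15 + vertical_adjust + (indice_vertical * 50) + (indice_vertical * vertical_adjust)
      acc2 ++ [(x, y)]) acc) []

-- ===== PORT B =====
def calculate_positions_mark_custom_alt (img_width : Int) (img_height : Int) : List (Int × Int) :=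
  let horizontal_quantity := Int.tdiv (img_width - 25) 115
  let horizontal_rest := PySem.Int.mod (img_width - 25) 115
  let horizontal_adjust := Int.tdiv horizontal_rest (horizontal_quantity + 1)
  let vertical_quantity := Int.tdiv (img_height - 15) 49
  let vertical_rest := PySem.Int.mod (img_height - 15) 49
  let vertical_adjust := Int.tdiv vertical_rest (vertical_quantity + 1)
  if horizontal_quantity ≤ 0 ∨ vertical_quantity ≤ 0 then []
  else
    let x_step := 115 + horizontal_adjust
    let y_step := 50 + vertical_adjust
    let total := horizontal_quantity * vertical_quantity
    (PySem.List.pyRange 0 total 1).map (fun k =>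
      (25 + horizontal_adjust + PySem.Int.floordiv k vertical_quantity * x_step,
       15 + vertical_adjust + PySem.Int.mod k vertical_quantity * y_step))

-- ===== PRECONDITION & SPEC =====
-- Pre_ excludes exactly the inputs where A raises ZeroDivisionError (a quantity truncates to -1,
-- i.e. img_width ∈ [-204, -90] or img_height ∈ [-82, -34]); B raises there as well.
def Pre_calculate_positions_mark_custom (img_width : Int) (img_height : Int) : Prop :=
  ¬ (-204 ≤ img_width ∧ img_width ≤ -90) ∧ ¬ (-82 ≤ img_height ∧ img_height ≤ -34)
instance (img_width : Int) (img_height : Int) : Decidable (Pre_calculate_positions_mark_custom img_width img_height) := by unfold Pre_calculate_positions_mark_custom; infer_instance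
def pvWitness_calculate_positions_mark_custom : Int × Int := (500, 300)

def Spec_calculate_positions_mark_custom (img_width : Int) (img_height : Int) (out : List (Int × Int)) : Prop := out = calculate_positions_mark_custom_alt img_width img_height
instance (img_width : Int) (img_height : Int) (out : List (Int × Int)) : Decidable (Spec_calculate_positions_mark_custom img_width img_height out) := by unfold Spec_calculate_positions_mark_custom; infer_instance

-- ===== CLAIM =====
def Claim_equal_calculate_positions_mark_custom : Prop := ∀ (img_width : Int) (img_height : Int), Dom_calculate_positions_mark_custom img_width img_height → Pre_calculate_positions_mark_custom img_width img_height → Spec_calculate_positions_mark_custom img_width img_height (calculate_positions_mark_custom img_width img_height)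

-- ===== LEMMAS AND PROOFS =====

-- flattening nested ranges equals divmod-decoding the flat range (Nat level)
theorem gridNat {α : Type} (f : Nat → Nat → α) (m n : Nat) :
    (List.range (m * n)).map (fun k => f (k / n) (k % n))
      = (List.range m).flatMap (fun i => (List.range n).map (fun j => f i j)) := by
  induction m with
  | zero => simp
  | succ m ih =>
    rw [Nat.succ_mul, List.range_add, List.map_append, ih, List.range_succ,
      List.flatMap_append, List.map_map]
    congr 1
    simp only [List.flatMap_cons, List.flatMap_nil, List.append_nil]
    apply List.map_congr_left
    intro j hj
    have hjn : j < n := List.mem_range.mp hj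
    have hn : 0 < n := Nat.lt_of_le_of_lt (Nat.zero_le j) hjn
    have hdiv : (m * n + j) / n = m := by
      rw [Nat.add_comm, Nat.add_mul_div_right _ _ hn, Nat.div_eq_of_lt hjn]
      omega
    have hmod : (m * n + j) % n = j := by
      rw [Nat.add_comm, Nat.add_mul_mod_self_right, Nat.mod_eq_of_lt hjn]
    simp [Function.comp, hdiv, hmod]

-- the same, at the Int level on pyRange, for positive bounds
theorem gridInt {α : Type} (f : Int → Int → α) (m n : Int) (hm : 0 < m) (hn : 0 < n) :
    (PySem.List.pyRange 0 (m * n) 1).map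
        (fun k => f (PySem.Int.floordiv k n) (PySem.Int.mod k n))
      = (PySem.List.pyRange 0 m 1).flatMap
          (fun i => (PySem.List.pyRange 0 n 1).map (fun j => f i j)) := by
  obtain ⟨m', rfl⟩ : ∃ m' : Nat, m = (m' : Int) := ⟨m.toNat, (Int.toNat_of_nonneg hm.le).symm⟩
  obtain ⟨n', rfl⟩ : ∃ n' : Nat, n = (n' : Int) := ⟨n.toNat, (Int.toNat_of_nonneg hn.le).symm⟩
  rw [show ((m' : Int) * n') = ((m' * n' : Nat) : Int) by push_cast; ring]
  simp only [PySem.List.pyRange_one, Int.sub_zero, Int.toNat_natCast, List.map_map, zero_add]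
  have hcomp : ((fun k => f (PySem.Int.floordiv k (n' : Int)) (PySem.Int.mod k (n' : Int))) ∘
      fun k : Nat => (k : Int)) = fun k : Nat => f ((k / n' : Nat) : Int) ((k % n' : Nat) : Int) := by
    funext k
    simp [Function.comp, PySem.Int.floordiv_natCast, PySem.Int.mod_natCast]
  rw [hcomp, gridNat (fun i j => f (i : Int) (j : Int)) m' n', List.flatMap_map]
  rfl

-- ===== VERDICT =====
theorem calculate_positions_mark_custom_spec : Claim_equal_calculate_positions_mark_custom := by
  intro w h _ _
  unfold Spec_calculate_positions_mark_custom calculate_positions_mark_custom calculate_positions_mark_custom_alt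
  simp only [PySem.List.foldl_append_singleton_eq_map, PySem.List.foldl_append_eq_flatMap,
    List.nil_append]
  set hq := Int.tdiv (w - 25) 115 with hhq
  set vq := Int.tdiv (h - 15) 49 with hvq
  set ha := (PySem.Int.mod (w - 25) 115).tdiv (hq + 1) with hha
  set va := (PySem.Int.mod (h - 15) 49).tdiv (vq + 1) with hva
  split
  · rename_i hle
    rcases hle with hle | hle
    · simp [PySem.List.pyRange_one_eq_nil hle]
    · simp [PySem.List.pyRange_one_eq_nil hle]
  · rename_i hgt
    simp only [not_or, not_le] at hgt
    refine Eq.trans ?_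
      (gridInt (fun a b => (25 + ha + a * (115 + ha), 15 + va + b * (50 + va)))
        hq vq hgt.1 hgt.2).symm
    apply List.flatMap_congr
    intro i _
    apply List.map_congr_left
    intro j _
    exact Prod.ext (by ring) (by ring)
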